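-- pv_equiv track=rewrite | github.com/gedeck/mistat | src/mistat/design/doeUtilities.py | aliasesInSubgroup
-- ===== SOURCE A (Python) =====
-- def _reduceTreatment(treatment):
--     """ Reduce a treatment string that can contain same effects multiple times """
--     effects = []
--     for c in sorted(set(treatment)):
--         if treatment.count(c) % 2 == 1:
--             effects.append(c)
--     return ''.join(sorted(effects))
--
-- def subgroupOfDefining(defining, noTreatment=''):
--     """ Given the defining treatments of a design, enumerate the subgroup """
--     subgroup = set(defining)
--     for d in defining:
--         subgroup.update([_reduceTreatment(d + sg) for sg in subgroup])
--     subgroup.remove('')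
--     subgroup.add(noTreatment)
--     return sorted(subgroup)
--
-- def aliasesInSubgroup(effect, defining):
--     subgroup = subgroupOfDefining(defining)
--     aliases = set()
--     for treatment in subgroup:
--         if not treatment:
--             continue
--         aliases.add(_reduceTreatment(effect + treatment))
--     return sorted(aliases)
-- ===== SOURCE B (Python) =====
-- def _reduceTreatment(treatment):
--     """ Reduce a treatment string that can contain same effects multiple times """
--     effects = []
--     for c in sorted(set(treatment)):
--         if treatment.count(c) % 2 == 1:
--             effects.append(c)
--     return ''.join(sorted(effects))
--
--
-- def aliasesInSubgroup(effect, defining):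
--     # Enumerate the subgroup directly as the XOR-folds of all subsets of the
--     # defining words, by recursion on the word list (take / skip each word),
--     # instead of growing an incremental closure set.
--     aliases = set()
--
--     def collect(words, treatment):
--         if not words:
--             if treatment:
--                 aliases.add(_reduceTreatment(effect + treatment))
--             return
--         collect(words[1:], treatment)                                  # skip words[0]
--         collect(words[1:], _reduceTreatment(treatment + words[0]))     # take words[0]
--
--     collect(defining, '')
--     return sorted(aliases)
-- ===== Notes on version B (the rewrite author's own statement) =====
-- stated objective: alternative
-- what changed: B drops subgroupOfDefining's incremental closure set entirely and enumerates the subgroup by recursive take/skip subset enumeration over the defining words, XOR-folding each subset with _reduceTreatment and aliasing the effect against every nonempty fold; it trades A's subgroup-sized closure for a full 2^k subset sweep, so it is not faster when many generators are dependent.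
-- intended difference: On inputs where some nonempty defining word has every character an even number of times (so it reduces to the identity), A keeps that raw word as a 'nonempty treatment' and emits the effect's own reduction as an alias of itself, while B skips identity treatments and omits it; an effect is not an alias of itself, so B's value is the intended one. — e.g. on aliasesInSubgroup("ab", ["aa"]): A returns ["ab"], B returns []
import Mathlib
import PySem

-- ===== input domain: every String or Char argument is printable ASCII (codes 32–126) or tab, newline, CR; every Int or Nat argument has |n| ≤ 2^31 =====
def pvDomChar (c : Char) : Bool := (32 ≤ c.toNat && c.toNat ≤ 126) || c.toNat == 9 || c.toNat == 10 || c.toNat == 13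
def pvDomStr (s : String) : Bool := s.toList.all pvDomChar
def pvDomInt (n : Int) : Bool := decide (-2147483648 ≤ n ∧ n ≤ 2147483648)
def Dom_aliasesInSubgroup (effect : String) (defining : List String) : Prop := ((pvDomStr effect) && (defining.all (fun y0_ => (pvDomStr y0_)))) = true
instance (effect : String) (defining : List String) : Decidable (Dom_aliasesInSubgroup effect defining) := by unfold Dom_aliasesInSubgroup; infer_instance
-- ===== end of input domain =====

-- B replaces A's incremental string-closure of the subgroup by a recursive take/skip subset
-- enumeration of the defining words, XOR-folding each subset with the shared reducer; on the
-- degenerate inputs described at D_ below B intentionally omits the effect's self-alias.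


-- Strings are modelled on the List Char side (PySem convention); both ports convert the
-- arguments once and convert the sorted result back at the end.

-- ===== PORT A =====
-- _reduceTreatment: for c in sorted(set(treatment)): append c if treatment.count(c) odd; join sorted
-- (shared helper: B's Python keeps A's _reduceTreatment verbatim, so both ports use pvRed)
def pvRed (treatment : List Char) : List Char :=
  let effects := (PySem.List.sorted (PySem.Set.ofList treatment) (fun c => c)).foldl
      (fun acc c => if PySem.List.count treatment c % 2 == 1 then acc ++ [c] else acc) []
  PySem.List.sorted effects (fun c => c)

-- one iteration of subgroupOfDefining's loop: subgroup.update([_reduceTreatment(d+sg) for sg in subgroup])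
def pvAStep (sg : PySem.Set (List Char)) (d : List Char) : PySem.Set (List Char) :=
  PySem.Set.update sg (sg.map (fun t => pvRed (d ++ t)))

def pvSubgroupOfDefining (defining : List (List Char)) (noTreatment : List Char) : List (List Char) :=
  let subgroup := defining.foldl pvAStep (PySem.Set.ofList defining)
  match PySem.Set.remove? subgroup [] with
  | some s => PySem.List.sorted (PySem.Set.add s noTreatment) (fun x => x)
  | none => []  -- Python raises KeyError here (only for defining = []); excluded by Pre_

def aliasesInSubgroup (effect : String) (defining : List String) : List String :=
  let subgroup := pvSubgroupOfDefining (defining.map String.toList) []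
  let aliases := subgroup.foldl
      (fun al t => if t = [] then al else PySem.Set.add al (pvRed (effect.toList ++ t)))
      PySem.Set.empty
  (PySem.List.sorted aliases (fun x => x)).map String.ofList

-- ===== PORT B =====
-- collect(words, treatment): skip words[0], then take words[0] (XOR-fold via _reduceTreatment);
-- at the leaf add the alias of every nonempty accumulated treatment
def pvCollect (effect : List Char) : List (List Char) → List Char → PySem.Set (List Char) → PySem.Set (List Char)
  | [], treatment, aliases =>
      if treatment.isEmpty then aliases
      else PySem.Set.add aliases (pvRed (effect ++ treatment))
  | w :: rest, treatment, aliases =>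
      pvCollect effect rest (pvRed (treatment ++ w)) (pvCollect effect rest treatment aliases)

def aliasesInSubgroup_alt (effect : String) (defining : List String) : List String :=
  (PySem.List.sorted
      (pvCollect effect.toList (defining.map String.toList) [] PySem.Set.empty)
      (fun x => x)).map String.ofList

-- ===== PRECONDITION & SPEC =====
-- Pre_ excludes only defining = [], on which A raises KeyError('') (subgroup.remove('') on a set without '')
def Pre_aliasesInSubgroup (effect : String) (defining : List String) : Prop := defining ≠ []
instance (effect : String) (defining : List String) : Decidable (Pre_aliasesInSubgroup effect defining) := by unfold Pre_aliasesInSubgroup; infer_instance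
def pvWitness_aliasesInSubgroup : String × List String := ("abc", ["ab", "bc"])

-- On inputs where some nonempty defining word has every character an even number of times (it
-- reduces to the identity), A keeps that raw word as a 'nonempty treatment' and emits the
-- effect's own reduction as an alias of itself, while B skips identity treatments and omits
-- it; an effect is not an alias of itself, so B's value is the intended one.
def D_aliasesInSubgroup (effect : String) (defining : List String) : Prop :=
  (defining.any (fun w => !w.toList.isEmpty && w.toList.all (fun c => w.toList.count c % 2 == 0))) = true
instance (effect : String) (defining : List String) : Decidable (D_aliasesInSubgroup effect defining) := by unfold D_aliasesInSubgroup; infer_instance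

def Spec_aliasesInSubgroup (effect : String) (defining : List String) (out : List String) : Prop := ¬ D_aliasesInSubgroup effect defining → out = aliasesInSubgroup_alt effect defining
instance (effect : String) (defining : List String) (out : List String) : Decidable (Spec_aliasesInSubgroup effect defining out) := by unfold Spec_aliasesInSubgroup; infer_instance

def pvDiffWitness_aliasesInSubgroup : String × List String := ("ab", ["aa"])
def pvDiffWitnessOut_aliasesInSubgroup : (List String) × (List String) := (["ab"], [])

-- ===== CLAIM (what is proved, stated in full; the proofs are below) =====
def Claim_unchanged_aliasesInSubgroup : Prop := ∀ (effect : String) (defining : List String), Dom_aliasesInSubgroup effect defining → Pre_aliasesInSubgroup effect defining → Spec_aliasesInSubgroup effect defining (aliasesInSubgroup effect defining)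
def Claim_changed_aliasesInSubgroup : Prop := Dom_aliasesInSubgroup (pvDiffWitness_aliasesInSubgroup.1) (pvDiffWitness_aliasesInSubgroup.2) ∧ Pre_aliasesInSubgroup (pvDiffWitness_aliasesInSubgroup.1) (pvDiffWitness_aliasesInSubgroup.2) ∧ D_aliasesInSubgroup (pvDiffWitness_aliasesInSubgroup.1) (pvDiffWitness_aliasesInSubgroup.2) ∧ aliasesInSubgroup (pvDiffWitness_aliasesInSubgroup.1) (pvDiffWitness_aliasesInSubgroup.2) = pvDiffWitnessOut_aliasesInSubgroup.1 ∧ aliasesInSubgroup_alt (pvDiffWitness_aliasesInSubgroup.1) (pvDiffWitness_aliasesInSubgroup.2) = pvDiffWitnessOut_aliasesInSubgroup.2 ∧ pvDiffWitnessOut_aliasesInSubgroup.1 ≠ pvDiffWitnessOut_aliasesInSubgroup.2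
def Claim_exact_aliasesInSubgroup : Prop := ∀ (effect : String) (defining : List String), Dom_aliasesInSubgroup effect defining → Pre_aliasesInSubgroup effect defining → D_aliasesInSubgroup effect defining → aliasesInSubgroup effect defining ≠ aliasesInSubgroup_alt effect defining

-- ===== LEMMAS AND PROOFS =====

-- parity vector of a character list: the set of characters occurring an odd number of times
def pvPar (cs : List Char) : Finset Char := cs.toFinset.filter (fun c => cs.count c % 2 = 1)
-- canonical (strictly sorted) representative of a parity vector
def pvCanon (q : Finset Char) : List Char := q.sort (· ≤ ·)

lemma mem_pvPar (cs : List Char) (c : Char) : c ∈ pvPar cs ↔ cs.count c % 2 = 1 := by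
  simp only [pvPar, Finset.mem_filter, List.mem_toFinset]
  constructor
  · rintro ⟨-, h⟩; exact h
  · intro h
    refine ⟨?_, h⟩
    by_contra hm
    rw [List.count_eq_zero.mpr hm] at h
    omega

lemma pvPar_append (a b : List Char) : pvPar (a ++ b) = symmDiff (pvPar a) (pvPar b) := by
  ext c
  simp only [mem_pvPar, Finset.mem_symmDiff, List.count_append]
  omega

lemma pvPar_nil : pvPar [] = ∅ := by
  ext c; simp [mem_pvPar]

lemma pvCanon_nodup (q : Finset Char) : (pvCanon q).Nodup := Finset.sort_nodup q _

lemma mem_pvCanon (q : Finset Char) (c : Char) : c ∈ pvCanon q ↔ c ∈ q := Finset.mem_sort _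

lemma pvCanon_pairwise (q : Finset Char) : List.Pairwise (· < ·) (pvCanon q) :=
  List.SortedLT.pairwise (Finset.sortedLT_sort q)

lemma pvPar_canon (q : Finset Char) : pvPar (pvCanon q) = q := by
  ext c
  rw [mem_pvPar]
  by_cases h : c ∈ q
  · rw [List.count_eq_one_of_mem (pvCanon_nodup q) ((mem_pvCanon q c).mpr h)]
    simpa using h
  · rw [List.count_eq_zero.mpr (fun hc => h ((mem_pvCanon q c).mp hc))]
    simpa using h

lemma pvCanon_empty : pvCanon ∅ = [] := by
  simp [pvCanon, Finset.sort_empty]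

lemma pvRed_eq (cs : List Char) : pvRed cs = pvCanon (pvPar cs) := by
  unfold pvRed
  rw [PySem.List.foldl_append_if (fun c => PySem.List.count cs c % 2 == 1) (fun c => c)]
  simp only [List.nil_append, List.map_id']
  apply PySem.List.sorted_eq_of_perm_of_pairwise_lt
  · rw [List.perm_ext_iff_of_nodup (pvCanon_nodup _)
      (List.Nodup.filter _ ((PySem.List.sorted_perm _ _ _).symm.nodup (PySem.Set.nodup_ofList cs)))]
    intro c
    rw [mem_pvCanon, mem_pvPar, List.mem_filter, PySem.List.mem_sorted, PySem.Set.mem_ofList]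
    simp only [PySem.List.count_eq, beq_iff_eq]
    constructor
    · intro h; exact ⟨List.count_pos_iff.mp (by omega), by omega⟩
    · rintro ⟨-, h⟩; omega
  · exact pvCanon_pairwise _

lemma pvRed_par (cs : List Char) : pvPar (pvRed cs) = pvPar cs := by
  rw [pvRed_eq, pvPar_canon]

lemma pvRed_append_par (a b : List Char) :
    pvPar (pvRed (a ++ b)) = symmDiff (pvPar a) (pvPar b) := by
  rw [pvRed_par, pvPar_append]

lemma pvSd_cancel (a b c : Finset Char) : symmDiff (symmDiff a c) (symmDiff b c) = symmDiff a b := by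
  rw [symmDiff_assoc, symmDiff_comm b c, symmDiff_symmDiff_cancel_left]

lemma pvSd_empty (a : Finset Char) : symmDiff a ∅ = a := by
  rw [← Finset.bot_eq_empty, symmDiff_bot]

lemma pvSd_empty_left (a : Finset Char) : symmDiff ∅ a = a := by
  rw [symmDiff_comm, pvSd_empty]

lemma pvSd_self (a : Finset Char) : symmDiff a a = ∅ := by
  rw [symmDiff_self]; rfl

lemma pvSd_left_comm (a b c : Finset Char) :
    symmDiff a (symmDiff b c) = symmDiff b (symmDiff a c) := by
  rw [← symmDiff_assoc, symmDiff_comm a b, symmDiff_assoc]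

lemma pvCanon_eq_nil_iff (q : Finset Char) : pvCanon q = [] ↔ q = ∅ :=
  ⟨fun h => by rw [← pvPar_canon q, h, pvPar_nil], fun h => by rw [h, pvCanon_empty]⟩

-- ghost span (proof-side only): the canonical parity forms reachable from the identity
def pvGStep (sp : PySem.Set (List Char)) (d : List Char) : PySem.Set (List Char) :=
  PySem.Set.union sp (PySem.Set.ofList (sp.map (fun p => pvRed (p ++ d))))

lemma mem_pvAStep (sg : PySem.Set (List Char)) (d t : List Char) :
    t ∈ pvAStep sg d ↔ t ∈ sg ∨ ∃ u ∈ sg, t = pvRed (d ++ u) := by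
  simp only [pvAStep, PySem.Set.mem_update, List.mem_map]
  constructor
  · rintro (h | ⟨u, hu, rfl⟩)
    · exact Or.inl h
    · exact Or.inr ⟨u, hu, rfl⟩
  · rintro (h | ⟨u, hu, rfl⟩)
    · exact Or.inl h
    · exact Or.inr ⟨u, hu, rfl⟩

lemma mem_pvGStep (sp : PySem.Set (List Char)) (d p : List Char) :
    p ∈ pvGStep sp d ↔ p ∈ sp ∨ ∃ u ∈ sp, p = pvRed (u ++ d) := by
  simp only [pvGStep, PySem.Set.mem_union, PySem.Set.mem_ofList, List.mem_map]
  constructor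
  · rintro (h | ⟨u, hu, rfl⟩)
    · exact Or.inl h
    · exact Or.inr ⟨u, hu, rfl⟩
  · rintro (h | ⟨u, hu, rfl⟩)
    · exact Or.inl h
    · exact Or.inr ⟨u, hu, rfl⟩

lemma AFold_mono (l : List (List Char)) : ∀ (sg : PySem.Set (List Char)) (t : List Char),
    t ∈ sg → t ∈ l.foldl pvAStep sg := by
  induction l with
  | nil => exact fun sg t h => h
  | cons d rest ih =>
    intro sg t h
    exact ih _ t ((mem_pvAStep sg d t).mpr (Or.inl h))

lemma GFold_mono (l : List (List Char)) : ∀ (sp : PySem.Set (List Char)) (p : List Char),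
    p ∈ sp → p ∈ l.foldl pvGStep sp := by
  induction l with
  | nil => exact fun sp p h => h
  | cons d rest ih =>
    intro sp p h
    exact ih _ p ((mem_pvGStep sp d p).mpr (Or.inl h))

-- the simultaneous invariant tying A's closure to the ghost span
lemma pvMainInv (D0 : List (List Char)) (l : List (List Char)) :
    ∀ (sg sp : PySem.Set (List Char)),
    (∀ t ∈ sg, t ∈ D0 ∨ t = pvCanon (pvPar t)) →
    (∀ p ∈ sp, p = pvCanon (pvPar p)) →
    (∀ q : Finset Char, (∃ t ∈ sg, pvPar t = q) ↔
        ∃ w ∈ D0, ∃ p ∈ sp, q = symmDiff (pvPar w) (pvPar p)) →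
    ((∀ t ∈ l.foldl pvAStep sg, t ∈ D0 ∨ t = pvCanon (pvPar t)) ∧
     (∀ p ∈ l.foldl pvGStep sp, p = pvCanon (pvPar p)) ∧
     (∀ q : Finset Char, (∃ t ∈ l.foldl pvAStep sg, pvPar t = q) ↔
        ∃ w ∈ D0, ∃ p ∈ l.foldl pvGStep sp, q = symmDiff (pvPar w) (pvPar p))) := by
  induction l with
  | nil => exact fun sg sp h1 h2 h3 => ⟨h1, h2, h3⟩
  | cons d rest ih =>
    intro sg sp hsg hsp hrel
    simp only [List.foldl_cons]
    apply ih
    · intro t ht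
      rcases (mem_pvAStep sg d t).mp ht with h | ⟨u, hu, rfl⟩
      · exact hsg t h
      · right; rw [pvRed_eq, pvPar_canon]
    · intro p hp
      rcases (mem_pvGStep sp d p).mp hp with h | ⟨u, hu, rfl⟩
      · exact hsp p h
      · rw [pvRed_eq, pvPar_canon]
    · intro q
      constructor
      · rintro ⟨t, ht, rfl⟩
        rcases (mem_pvAStep sg d t).mp ht with h | ⟨u, hu, rfl⟩
        · obtain ⟨w, hw, p, hp, hq⟩ := (hrel (pvPar t)).mp ⟨t, h, rfl⟩
          exact ⟨w, hw, p, (mem_pvGStep sp d p).mpr (Or.inl hp), hq⟩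
        · obtain ⟨w, hw, p, hp, hq⟩ := (hrel (pvPar u)).mp ⟨u, hu, rfl⟩
          refine ⟨w, hw, pvRed (p ++ d), (mem_pvGStep sp d _).mpr (Or.inr ⟨p, hp, rfl⟩), ?_⟩
          rw [pvRed_append_par, pvRed_append_par, hq, pvSd_left_comm, symmDiff_comm (pvPar d) (pvPar p)]
      · rintro ⟨w, hw, p', hp', rfl⟩
        rcases (mem_pvGStep sp d p').mp hp' with h | ⟨u, hu, rfl⟩
        · obtain ⟨t, ht, hteq⟩ := (hrel _).mpr ⟨w, hw, p', h, rfl⟩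
          exact ⟨t, (mem_pvAStep sg d t).mpr (Or.inl ht), hteq⟩
        · obtain ⟨t0, ht0, hteq⟩ := (hrel (symmDiff (pvPar w) (pvPar u))).mpr ⟨w, hw, u, hu, rfl⟩
          refine ⟨pvRed (d ++ t0), (mem_pvAStep sg d _).mpr (Or.inr ⟨t0, ht0, rfl⟩), ?_⟩
          rw [pvRed_append_par, hteq, pvRed_append_par, pvSd_left_comm, symmDiff_comm (pvPar d) (pvPar u)]

-- span invariant: contains the identity, closed under symmetric difference, contains each
-- processed generator's parity
lemma pvSpanInv (l : List (List Char)) : ∀ sp : PySem.Set (List Char),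
    (∃ p ∈ sp, pvPar p = ∅) →
    (∀ p ∈ sp, ∀ r ∈ sp, ∃ s ∈ sp, pvPar s = symmDiff (pvPar p) (pvPar r)) →
    ((∃ p ∈ l.foldl pvGStep sp, pvPar p = ∅) ∧
     (∀ p ∈ l.foldl pvGStep sp, ∀ r ∈ l.foldl pvGStep sp,
        ∃ s ∈ l.foldl pvGStep sp, pvPar s = symmDiff (pvPar p) (pvPar r)) ∧
     (∀ w ∈ l, ∃ p ∈ l.foldl pvGStep sp, pvPar p = pvPar w)) := by
  induction l with
  | nil => exact fun sp h0 hcl => ⟨h0, hcl, by simp⟩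
  | cons d rest ih =>
    intro sp h0 hcl
    simp only [List.foldl_cons]
    have step0 : ∃ p ∈ pvGStep sp d, pvPar p = ∅ := by
      obtain ⟨p, hp, hpe⟩ := h0
      exact ⟨p, (mem_pvGStep sp d p).mpr (Or.inl hp), hpe⟩
    have stepcl : ∀ p ∈ pvGStep sp d, ∀ r ∈ pvGStep sp d,
        ∃ s ∈ pvGStep sp d, pvPar s = symmDiff (pvPar p) (pvPar r) := by
      intro p hp r hr
      rcases (mem_pvGStep sp d p).mp hp with h1 | ⟨u1, hu1, rfl⟩ <;>
        rcases (mem_pvGStep sp d r).mp hr with h2 | ⟨u2, hu2, rfl⟩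
      · obtain ⟨s, hs, hse⟩ := hcl p h1 r h2
        exact ⟨s, (mem_pvGStep sp d s).mpr (Or.inl hs), hse⟩
      · obtain ⟨s, hs, hse⟩ := hcl p h1 u2 hu2
        refine ⟨pvRed (s ++ d), (mem_pvGStep sp d _).mpr (Or.inr ⟨s, hs, rfl⟩), ?_⟩
        rw [pvRed_append_par, pvRed_append_par, hse, symmDiff_assoc]
      · obtain ⟨s, hs, hse⟩ := hcl u1 hu1 r h2
        refine ⟨pvRed (s ++ d), (mem_pvGStep sp d _).mpr (Or.inr ⟨s, hs, rfl⟩), ?_⟩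
        rw [pvRed_append_par, pvRed_append_par, hse, symmDiff_right_comm]
      · obtain ⟨s, hs, hse⟩ := hcl u1 hu1 u2 hu2
        refine ⟨s, (mem_pvGStep sp d s).mpr (Or.inl hs), ?_⟩
        rw [hse, pvRed_append_par, pvRed_append_par, pvSd_cancel]
    obtain ⟨ih0, ihcl, ihgen⟩ := ih (pvGStep sp d) step0 stepcl
    refine ⟨ih0, ihcl, ?_⟩
    intro w hw
    rcases List.mem_cons.mp hw with rfl | hw'
    · obtain ⟨p0, hp0, hp0e⟩ := h0
      refine ⟨pvRed (p0 ++ w),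
        GFold_mono rest _ _ ((mem_pvGStep sp w _).mpr (Or.inr ⟨p0, hp0, rfl⟩)), ?_⟩
      rw [pvRed_append_par, hp0e, pvSd_empty_left]
    · exact ihgen w hw'

-- the alias-accumulation loop of port A
lemma pvAliasFold (f : List Char → List Char) (l : List (List Char)) :
    ∀ s : PySem.Set (List Char), s.Nodup →
    ((l.foldl (fun al t => if t = [] then al else PySem.Set.add al (f t)) s).Nodup ∧
     ∀ x, x ∈ l.foldl (fun al t => if t = [] then al else PySem.Set.add al (f t)) s ↔
        x ∈ s ∨ ∃ t ∈ l, t ≠ [] ∧ x = f t) := by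
  induction l with
  | nil =>
    intro s h
    refine ⟨h, fun x => ?_⟩
    simp
  | cons t0 rest ih =>
    intro s h
    simp only [List.foldl_cons]
    by_cases h0 : t0 = []
    · rw [if_pos h0]
      obtain ⟨hn, hm⟩ := ih s h
      refine ⟨hn, fun x => ?_⟩
      rw [hm x]
      subst h0
      constructor
      · rintro (h | ⟨t, ht, hne, rfl⟩)
        · exact Or.inl h
        · exact Or.inr ⟨t, List.mem_cons_of_mem _ ht, hne, rfl⟩
      · rintro (h | ⟨t, ht, hne, rfl⟩)
        · exact Or.inl h
        · rcases List.mem_cons.mp ht with rfl | ht'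
          · exact absurd rfl hne
          · exact Or.inr ⟨t, ht', hne, rfl⟩
    · rw [if_neg h0]
      obtain ⟨hn, hm⟩ := ih (PySem.Set.add s (f t0)) (PySem.Set.nodup_add s (f t0) h)
      refine ⟨hn, fun x => ?_⟩
      rw [hm x]
      simp only [PySem.Set.mem_add]
      constructor
      · rintro ((h | rfl) | ⟨t, ht, hne, rfl⟩)
        · exact Or.inl h
        · exact Or.inr ⟨t0, List.mem_cons_self, h0, rfl⟩
        · exact Or.inr ⟨t, List.mem_cons_of_mem _ ht, hne, rfl⟩
      · rintro (h | ⟨t, ht, hne, rfl⟩)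
        · exact Or.inl (Or.inl h)
        · rcases List.mem_cons.mp ht with rfl | ht'
          · exact Or.inl (Or.inr rfl)
          · exact Or.inr ⟨t, ht', hne, rfl⟩

-- [] is in A's closed subgroup as soon as defining is nonempty
lemma empty_mem_AFold (d : List Char) (ds : List (List Char)) :
    [] ∈ (d :: ds).foldl pvAStep (PySem.Set.ofList (d :: ds)) := by
  simp only [List.foldl_cons]
  apply AFold_mono
  apply (mem_pvAStep _ d []).mpr
  refine Or.inr ⟨d, (PySem.Set.mem_ofList _ _).mpr List.mem_cons_self, ?_⟩
  rw [pvRed_eq, pvPar_append, pvSd_self, pvCanon_empty]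

-- membership in the alias set that port A accumulates
lemma pvAMem (e0 : List Char) (dl : List (List Char)) :
    (((PySem.List.sorted (PySem.Set.add (PySem.Set.discard (dl.foldl pvAStep (PySem.Set.ofList dl)) []) []) (fun y => y)).foldl
        (fun al t => if t = [] then al else PySem.Set.add al (pvRed (e0 ++ t))) PySem.Set.empty).Nodup ∧
     ∀ x, x ∈ (PySem.List.sorted (PySem.Set.add (PySem.Set.discard (dl.foldl pvAStep (PySem.Set.ofList dl)) []) []) (fun y => y)).foldl
        (fun al t => if t = [] then al else PySem.Set.add al (pvRed (e0 ++ t))) PySem.Set.empty ↔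
      ∃ t ∈ dl.foldl pvAStep (PySem.Set.ofList dl), t ≠ [] ∧ x = pvRed (e0 ++ t)) := by
  obtain ⟨hn, hm⟩ := pvAliasFold (fun t => pvRed (e0 ++ t))
    (PySem.List.sorted (PySem.Set.add (PySem.Set.discard (dl.foldl pvAStep (PySem.Set.ofList dl)) []) []) (fun y => y))
    PySem.Set.empty (by simp [PySem.Set.empty])
  refine ⟨hn, fun x => ?_⟩
  rw [hm x]
  simp only [PySem.Set.empty, List.not_mem_nil, false_or, PySem.List.mem_sorted,
    PySem.Set.mem_add, PySem.Set.mem_discard]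
  constructor
  · rintro ⟨t, (⟨ht, -⟩ | rfl), hne, rfl⟩
    · exact ⟨t, ht, hne, rfl⟩
    · exact absurd rfl hne
  · rintro ⟨t, ht, hne, rfl⟩
    exact ⟨t, Or.inl ⟨ht, hne⟩, hne, rfl⟩

-- initial-state facts for the main invariant
lemma pvInit (dl : List (List Char)) :
    (∀ t ∈ PySem.Set.ofList dl, t ∈ dl ∨ t = pvCanon (pvPar t)) ∧
    (∀ p ∈ PySem.Set.ofList [([] : List Char)], p = pvCanon (pvPar p)) ∧
    (∀ q : Finset Char, (∃ t ∈ PySem.Set.ofList dl, pvPar t = q) ↔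
        ∃ w ∈ dl, ∃ p ∈ PySem.Set.ofList [([] : List Char)], q = symmDiff (pvPar w) (pvPar p)) := by
  have hmemnil : ∀ p, p ∈ PySem.Set.ofList [([] : List Char)] ↔ p = [] := by
    intro p; rw [PySem.Set.mem_ofList]; simp
  refine ⟨fun t ht => Or.inl ((PySem.Set.mem_ofList _ _).mp ht), ?_, ?_⟩
  · intro p hp
    rw [(hmemnil p).mp hp, pvPar_nil, pvCanon_empty]
  · intro q
    constructor
    · rintro ⟨t, ht, rfl⟩
      exact ⟨t, (PySem.Set.mem_ofList _ _).mp ht, [], (hmemnil []).mpr rfl,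
        by rw [pvPar_nil, pvSd_empty]⟩
    · rintro ⟨w, hw, p, hp, rfl⟩
      rw [(hmemnil p).mp hp, pvPar_nil, pvSd_empty]
      exact ⟨w, (PySem.Set.mem_ofList _ _).mpr hw, rfl⟩

lemma pvInitSpan :
    (∃ p ∈ PySem.Set.ofList [([] : List Char)], pvPar p = ∅) ∧
    (∀ p ∈ PySem.Set.ofList [([] : List Char)], ∀ r ∈ PySem.Set.ofList [([] : List Char)],
      ∃ s ∈ PySem.Set.ofList [([] : List Char)], pvPar s = symmDiff (pvPar p) (pvPar r)) := by
  have hmemnil : ∀ p, p ∈ PySem.Set.ofList [([] : List Char)] ↔ p = [] := by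
    intro p; rw [PySem.Set.mem_ofList]; simp
  refine ⟨⟨[], (hmemnil []).mpr rfl, pvPar_nil⟩, ?_⟩
  intro p hp r hr
  rw [(hmemnil p).mp hp, (hmemnil r).mp hr]
  exact ⟨[], (hmemnil []).mpr rfl, by rw [pvPar_nil, pvSd_empty]⟩

-- subset-XOR predicate: X is the parity of the XOR-fold of some subset of ds
def pvSubXor : List (List Char) → Finset Char → Prop
  | [], X => X = ∅
  | w :: rest, X => pvSubXor rest X ∨ ∃ Y, pvSubXor rest Y ∧ X = symmDiff (pvPar w) Y

lemma pvSubXor_empty (ds : List (List Char)) : pvSubXor ds ∅ := by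
  induction ds with
  | nil => rfl
  | cons w rest ih => exact Or.inl ih

lemma pvSubXor_gen (ds : List (List Char)) (w : List Char) (hw : w ∈ ds) :
    pvSubXor ds (pvPar w) := by
  induction ds with
  | nil => cases hw
  | cons v rest ih =>
    rcases List.mem_cons.mp hw with rfl | hw'
    · exact Or.inr ⟨∅, pvSubXor_empty rest, (pvSd_empty _).symm⟩
    · exact Or.inl (ih hw')

lemma pvSubXor_xor (ds : List (List Char)) :
    ∀ X Y, pvSubXor ds X → pvSubXor ds Y → pvSubXor ds (symmDiff X Y) := by
  induction ds with
  | nil =>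
    intro X Y hX hY
    cases hX; cases hY
    rw [pvSd_empty]; rfl
  | cons w rest ih =>
    intro X Y hX hY
    rcases hX with hX | ⟨X', hX', rfl⟩ <;> rcases hY with hY | ⟨Y', hY', rfl⟩
    · exact Or.inl (ih X Y hX hY)
    · exact Or.inr ⟨symmDiff X Y', ih X Y' hX hY', pvSd_left_comm X (pvPar w) Y'⟩
    · exact Or.inr ⟨symmDiff X' Y, ih X' Y hX' hY, symmDiff_assoc _ _ _⟩
    · have hc : symmDiff (symmDiff (pvPar w) X') (symmDiff (pvPar w) Y') = symmDiff X' Y' := by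
        rw [symmDiff_comm (pvPar w) X', symmDiff_comm (pvPar w) Y', pvSd_cancel]
      rw [hc]
      exact Or.inl (ih X' Y' hX' hY')

-- SubXor is realized in the ghost span
lemma pvSubXor_realized (SP : PySem.Set (List Char))
    (h0 : ∃ p ∈ SP, pvPar p = ∅)
    (hcl : ∀ p ∈ SP, ∀ r ∈ SP, ∃ s ∈ SP, pvPar s = symmDiff (pvPar p) (pvPar r)) :
    ∀ ds : List (List Char), (∀ w ∈ ds, ∃ p ∈ SP, pvPar p = pvPar w) →
    ∀ X, pvSubXor ds X → ∃ p ∈ SP, pvPar p = X := by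
  intro ds
  induction ds with
  | nil =>
    intro _ X hX; cases hX; exact h0
  | cons w rest ih =>
    intro hgen X hX
    rcases hX with hX | ⟨Y, hY, rfl⟩
    · exact ih (fun v hv => hgen v (List.mem_cons_of_mem _ hv)) X hX
    · obtain ⟨p, hp, hpe⟩ := ih (fun v hv => hgen v (List.mem_cons_of_mem _ hv)) Y hY
      obtain ⟨g, hg, hge⟩ := hgen w List.mem_cons_self
      obtain ⟨s, hs, hse⟩ := hcl g hg p hp
      exact ⟨s, hs, by rw [hse, hge, hpe]⟩

-- every ghost-span element's parity is a subset XOR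
lemma span_subXor (dl : List (List Char)) (l : List (List Char)) (hl : ∀ d ∈ l, d ∈ dl) :
    ∀ sp : PySem.Set (List Char), (∀ p ∈ sp, pvSubXor dl (pvPar p)) →
    ∀ p ∈ l.foldl pvGStep sp, pvSubXor dl (pvPar p) := by
  induction l with
  | nil => exact fun sp h => h
  | cons d rest ih =>
    intro sp hsp
    refine ih (fun v hv => hl v (List.mem_cons_of_mem _ hv)) (pvGStep sp d) ?_
    intro p hp
    rcases (mem_pvGStep sp d p).mp hp with h | ⟨u, hu, rfl⟩
    · exact hsp p h
    · rw [pvRed_append_par]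
      exact pvSubXor_xor dl _ _ (hsp u hu) (pvSubXor_gen dl d (hl d List.mem_cons_self))

-- membership/nodup of B's recursive subset enumeration
lemma pvCollect_mem (e : List Char) (ds : List (List Char)) :
    ∀ (t : List Char) (al : PySem.Set (List Char)), t = pvCanon (pvPar t) → al.Nodup →
    ((pvCollect e ds t al).Nodup ∧
     ∀ x, x ∈ pvCollect e ds t al ↔ x ∈ al ∨
        ∃ X, pvSubXor ds X ∧ symmDiff (pvPar t) X ≠ ∅ ∧
          x = pvCanon (symmDiff (pvPar e) (symmDiff (pvPar t) X))) := by
  induction ds with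
  | nil =>
    intro t al ht hal
    simp only [pvCollect]
    by_cases h0 : t.isEmpty
    · rw [if_pos h0]
      refine ⟨hal, fun x => ?_⟩
      have hpar : pvPar t = ∅ := by
        rw [ht, pvPar_canon] at *
        rw [← pvCanon_eq_nil_iff, ← ht]
        exact List.isEmpty_iff.mp h0
      constructor
      · exact Or.inl
      · rintro (h | ⟨X, hX, hne, rfl⟩)
        · exact h
        · cases hX; rw [hpar, pvSd_empty] at hne; exact absurd rfl hne
    · rw [if_neg h0]
      have hpar : pvPar t ≠ ∅ := by
        intro h
        apply h0
        rw [ht, h, pvCanon_empty]; rfl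
      refine ⟨PySem.Set.nodup_add _ _ hal, fun x => ?_⟩
      rw [PySem.Set.mem_add]
      constructor
      · rintro (h | rfl)
        · exact Or.inl h
        · exact Or.inr ⟨∅, rfl, by rw [pvSd_empty]; exact hpar,
            by rw [pvSd_empty, pvRed_eq, pvPar_append]⟩
      · rintro (h | ⟨X, hX, hne, rfl⟩)
        · exact Or.inl h
        · cases hX
          right
          rw [pvSd_empty, pvRed_eq, pvPar_append]
  | cons w rest ih =>
    intro t al ht hal
    simp only [pvCollect]
    obtain ⟨hn1, hm1⟩ := ih t al ht hal
    obtain ⟨hn2, hm2⟩ := ih (pvRed (t ++ w)) (pvCollect e rest t al)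
      (by rw [pvRed_eq, pvPar_canon]) hn1
    refine ⟨hn2, fun x => ?_⟩
    have hx : ∀ X : Finset Char, symmDiff (pvPar (pvRed (t ++ w))) X
        = symmDiff (pvPar t) (symmDiff (pvPar w) X) := by
      intro X; rw [pvRed_append_par, symmDiff_assoc]
    rw [hm2 x]
    simp only [hm1 x]
    constructor
    · rintro ((h | ⟨X, hX, hne, rfl⟩) | ⟨X, hX, hne, rfl⟩)
      · exact Or.inl h
      · exact Or.inr ⟨X, Or.inl hX, hne, rfl⟩
      · exact Or.inr ⟨symmDiff (pvPar w) X, Or.inr ⟨X, hX, rfl⟩,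
          by rw [← hx]; exact hne, by rw [← hx]⟩
    · rintro (h | ⟨X, hX | ⟨Y, hY, rfl⟩, hne, rfl⟩)
      · exact Or.inl (Or.inl h)
      · exact Or.inl (Or.inr ⟨X, hX, hne, rfl⟩)
      · exact Or.inr ⟨Y, hY, by rw [hx]; exact hne, by rw [hx]⟩

-- parity reading of the D_ condition
lemma pvD_parity (w : List Char) :
    (∀ c ∈ w, w.count c % 2 = 0) ↔ pvPar w = ∅ := by
  constructor
  · intro h
    ext c
    simp only [mem_pvPar, Finset.notMem_empty, iff_false]
    intro hc1
    by_cases hc : c ∈ w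
    · have := h c hc; omega
    · rw [List.count_eq_zero.mpr hc] at hc1; omega
  · intro h c hc
    have h1 : ¬ (w.count c % 2 = 1) := by rw [← mem_pvPar, h]; exact Finset.notMem_empty c
    omega

lemma pvD_iff (effect : String) (defining : List String) :
    D_aliasesInSubgroup effect defining ↔
      ∃ w ∈ defining, w.toList ≠ [] ∧ pvPar w.toList = ∅ := by
  unfold D_aliasesInSubgroup
  rw [List.any_eq_true]
  refine exists_congr fun w => and_congr_right fun _ => ?_
  simp only [Bool.and_eq_true, Bool.not_eq_eq_eq_not, Bool.not_true, List.isEmpty_eq_false_iff,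
    List.all_eq_true, beq_iff_eq, ← pvD_parity]

lemma pvMemNilSet (p : List Char) : p ∈ PySem.Set.ofList [([] : List Char)] ↔ p = [] := by
  rw [PySem.Set.mem_ofList]; simp

-- every parity reached by A's closure is a subset XOR
lemma pvAF_subXor (dl : List (List Char)) (t : List Char)
    (ht : t ∈ dl.foldl pvAStep (PySem.Set.ofList dl)) : pvSubXor dl (pvPar t) := by
  obtain ⟨hsg0, hsp0, hrel0⟩ := pvInit dl
  obtain ⟨-, -, hrelF⟩ := pvMainInv dl dl _ _ hsg0 hsp0 hrel0
  obtain ⟨w, hw, p, hp, hq⟩ := (hrelF (pvPar t)).mp ⟨t, ht, rfl⟩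
  have hpX : pvSubXor dl (pvPar p) :=
    span_subXor dl dl (fun d h => h) _
      (fun r hr => by rw [(pvMemNilSet r).mp hr, pvPar_nil]; exact pvSubXor_empty dl) p hp
  rw [hq]
  exact pvSubXor_xor dl _ _ (pvSubXor_gen dl w hw) hpX

-- every nonzero subset XOR is the parity of some nonempty element of A's closure
lemma pvAF_real (dl : List (List Char)) (hdl : dl ≠ []) (X : Finset Char)
    (hX : pvSubXor dl X) :
    ∃ t ∈ dl.foldl pvAStep (PySem.Set.ofList dl), pvPar t = X := by
  obtain ⟨hsg0, hsp0, hrel0⟩ := pvInit dl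
  obtain ⟨-, -, hrelF⟩ := pvMainInv dl dl _ _ hsg0 hsp0 hrel0
  obtain ⟨h00, hcl0⟩ := pvInitSpan
  obtain ⟨hid, hspCl, hspGen⟩ := pvSpanInv dl _ h00 hcl0
  obtain ⟨d0, ds, rfl⟩ := List.exists_cons_of_ne_nil hdl
  obtain ⟨p, hp, hpe⟩ := pvSubXor_realized _ hid hspCl _ hspGen X hX
  obtain ⟨g, hg, hge⟩ := hspGen d0 List.mem_cons_self
  obtain ⟨r, hr, hre⟩ := hspCl g hg p hp
  obtain ⟨t, ht, hte⟩ := (hrelF (symmDiff (pvPar d0) (pvPar r))).mpr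
    ⟨d0, List.mem_cons_self, r, hr, rfl⟩
  refine ⟨t, ht, ?_⟩
  rw [hte, hre, hge, hpe, symmDiff_symmDiff_cancel_left]

-- membership in B's alias set, in subset-XOR form
lemma pvBMem (e : List Char) (dl : List (List Char)) :
    (pvCollect e dl [] PySem.Set.empty).Nodup ∧
    ∀ x, x ∈ pvCollect e dl [] PySem.Set.empty ↔
      ∃ X, pvSubXor dl X ∧ X ≠ ∅ ∧ x = pvCanon (symmDiff (pvPar e) X) := by
  obtain ⟨hn, hm⟩ := pvCollect_mem e dl [] PySem.Set.empty
    (by rw [pvPar_nil, pvCanon_empty]) (by simp [PySem.Set.empty])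
  refine ⟨hn, fun x => ?_⟩
  rw [hm x]
  simp only [PySem.Set.empty, List.not_mem_nil, false_or, pvPar_nil, pvSd_empty_left]

-- ===== VERDICT (by name: the statement is the Claim_ definition above) =====
theorem aliasesInSubgroup_spec : Claim_unchanged_aliasesInSubgroup := by
  intro effect defining _hDom hPre hD
  have hdl : defining.map String.toList ≠ [] := by
    intro h
    exact hPre (List.map_eq_nil_iff.mp h)
  -- shorthands
  set e := effect.toList with he
  set dl := defining.map String.toList with hdleq
  -- [] belongs to A's closed subgroup
  have hmemSG : [] ∈ dl.foldl pvAStep (PySem.Set.ofList dl) := by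
    obtain ⟨d0, ds, hcons⟩ := List.exists_cons_of_ne_nil hdl
    rw [hcons]
    exact empty_mem_AFold d0 ds
  obtain ⟨hAn, hAm⟩ := pvAMem e dl
  obtain ⟨hBn, hBm⟩ := pvBMem e dl
  -- the two alias sets have the same members
  have hiff : ∀ x,
      (∃ t ∈ dl.foldl pvAStep (PySem.Set.ofList dl), t ≠ [] ∧ x = pvRed (e ++ t)) ↔
      x ∈ pvCollect e dl [] PySem.Set.empty := by
    intro x
    rw [hBm x]
    constructor
    · rintro ⟨t, ht, hne, rfl⟩
      refine ⟨pvPar t, pvAF_subXor dl t ht, ?_, by rw [pvRed_eq, pvPar_append]⟩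
      intro hz
      obtain ⟨hsg0, hsp0, hrel0⟩ := pvInit dl
      obtain ⟨hsgF, -, -⟩ := pvMainInv dl dl _ _ hsg0 hsp0 hrel0
      rcases hsgF t ht with hraw | hcanon
      · obtain ⟨w, hw, hwt⟩ := List.mem_map.mp (hdleq ▸ hraw)
        exact hD ((pvD_iff effect defining).mpr ⟨w, hw, by rw [hwt]; exact hne, by rw [hwt]; exact hz⟩)
      · exact hne (by rw [hcanon, hz, pvCanon_empty])
    · rintro ⟨X, hX, hz, rfl⟩
      obtain ⟨t, ht, hte⟩ := pvAF_real dl hdl X hX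
      refine ⟨t, ht, ?_, by rw [pvRed_eq, pvPar_append, hte]⟩
      intro h
      rw [h, pvPar_nil] at hte
      exact hz hte.symm
  -- assemble: both outputs are the sorted same-membership nodup sets
  unfold aliasesInSubgroup aliasesInSubgroup_alt pvSubgroupOfDefining
  dsimp only
  rw [← hdleq, ← he, PySem.Set.remove?_of_mem hmemSG]
  have hperm := (List.perm_ext_iff_of_nodup hAn hBn).mpr (fun x => by rw [hAm x, hiff x])
  have hfinal := PySem.List.sorted_eq_sorted_of_perm _ _ (fun a : List Char => a)
    (fun a b h => h) hperm
  apply congrArg (List.map String.ofList)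
  convert hfinal using 2

set_option maxRecDepth 8192 in
theorem aliasesInSubgroup_changed : Claim_changed_aliasesInSubgroup := by
  unfold Claim_changed_aliasesInSubgroup
  exact ⟨by decide, by decide, by decide, by decide, by decide, by decide⟩

theorem aliasesInSubgroup_tight : Claim_exact_aliasesInSubgroup := by
  intro effect defining _hDom hPre hD heq
  obtain ⟨w, hw, hwne, hwz⟩ := (pvD_iff effect defining).mp hD
  set e := effect.toList with he
  set dl := defining.map String.toList with hdleq
  have hdl : dl ≠ [] := by
    rw [hdleq]
    intro h
    exact hPre (List.map_eq_nil_iff.mp h)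
  have hmemSG : [] ∈ dl.foldl pvAStep (PySem.Set.ofList dl) := by
    obtain ⟨d0, ds, hcons⟩ := List.exists_cons_of_ne_nil hdl
    rw [hcons]
    exact empty_mem_AFold d0 ds
  obtain ⟨hAn, hAm⟩ := pvAMem e dl
  obtain ⟨hBn, hBm⟩ := pvBMem e dl
  -- the effect's own reduction is in A's alias set …
  have hvA : pvCanon (pvPar e) ∈
      (PySem.List.sorted (PySem.Set.add (PySem.Set.discard (dl.foldl pvAStep (PySem.Set.ofList dl)) []) []) (fun y => y)).foldl
        (fun al t => if t = [] then al else PySem.Set.add al (pvRed (e ++ t))) PySem.Set.empty := by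
    rw [hAm]
    refine ⟨w.toList, AFold_mono dl _ _ ((PySem.Set.mem_ofList _ _).mpr ?_), hwne, ?_⟩
    · rw [hdleq]; exact List.mem_map_of_mem hw
    · rw [pvRed_eq, pvPar_append, hwz, pvSd_empty]
  -- … but not in B's
  have hvB : pvCanon (pvPar e) ∉ pvCollect e dl [] PySem.Set.empty := by
    rw [hBm]
    rintro ⟨X, -, hz, hXe⟩
    apply hz
    have := congrArg pvPar hXe
    rw [pvPar_canon, pvPar_canon] at this
    calc X = symmDiff (pvPar e) (symmDiff (pvPar e) X) := (symmDiff_symmDiff_cancel_left _ _).symm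
    _ = symmDiff (pvPar e) (pvPar e) := by rw [← this]
    _ = ∅ := pvSd_self _
  -- hence the two outputs differ at the string of that reduction
  have hxA : String.ofList (pvCanon (pvPar e)) ∈ aliasesInSubgroup effect defining := by
    unfold aliasesInSubgroup pvSubgroupOfDefining
    dsimp only
    rw [← hdleq, ← he, PySem.Set.remove?_of_mem hmemSG]
    exact List.mem_map_of_mem ((PySem.List.mem_sorted _ _ _ _).mpr hvA)
  have hxB : String.ofList (pvCanon (pvPar e)) ∉ aliasesInSubgroup_alt effect defining := by
    unfold aliasesInSubgroup_alt
    rw [← hdleq, ← he]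
    intro hmem
    obtain ⟨y, hy, hye⟩ := List.mem_map.mp hmem
    have : y = pvCanon (pvPar e) := by
      have := congrArg String.toList hye
      simpa using this
    exact hvB (this ▸ (PySem.List.mem_sorted _ _ _ _).mp hy)
  rw [heq] at hxA
  exact hxB hxA
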